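-- pv_equiv track=rewrite | github.com/wdi2020/wdi_python | kolokwia_2014/ad_wdi_k2a/zad2.py | check
-- ===== SOURCE A (Python) =====
-- def check(s1,s2):
--     samogloski = ('a','e','i','y','u','o')
--     sum1 = 0
--     il_sam = 0
--     for letter in s1:
--         sum1 += ord(letter)
--         if letter in samogloski:
--             il_sam+=1
--     for letter in s2:
--         sum1 -= ord(letter)
--         if letter in samogloski:
--             il_sam-=1
--     if sum1 == il_sam == 0:
--         return True
--     return False
-- ===== SOURCE B (Python) =====
-- def check(s1, s2):
--     # Build one signed character-frequency table (counts from s1, minus counts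
--     # from s2), then decide both conditions by aggregating over DISTINCT chars.
--     freq = {}
--     for c in s1:
--         freq[c] = freq.get(c, 0) + 1
--     for c in s2:
--         freq[c] = freq.get(c, 0) - 1
--     vowels = 'aeiyuo'
--     return sum(ord(c) * n for c, n in freq.items()) == 0 and \
--            sum(n for c, n in freq.items() if c in vowels) == 0
-- ===== Notes on version B (the rewrite author's own statement) =====
-- stated objective: alternative
-- what changed: Replaces A's per-character running-difference accumulators (ord-sum and vowel-count threaded through both strings) with a signed character-frequency dictionary: B counts each distinct character (+1 from s1, -1 from s2) and decides both conditions by weighted aggregation over the frequency table's items (ord(c)*count, and count over vowels).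
import Mathlib
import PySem

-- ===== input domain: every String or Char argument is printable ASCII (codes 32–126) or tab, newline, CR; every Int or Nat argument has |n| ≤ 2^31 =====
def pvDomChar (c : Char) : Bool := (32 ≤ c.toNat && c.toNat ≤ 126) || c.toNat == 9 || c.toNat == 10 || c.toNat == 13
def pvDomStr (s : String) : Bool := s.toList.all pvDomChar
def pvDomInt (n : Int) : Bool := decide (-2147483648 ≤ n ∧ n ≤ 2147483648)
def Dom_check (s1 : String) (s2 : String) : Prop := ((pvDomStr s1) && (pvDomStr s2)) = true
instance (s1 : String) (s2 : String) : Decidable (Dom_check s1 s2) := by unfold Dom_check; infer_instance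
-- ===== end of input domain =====

-- B replaces A's running difference accumulators with a signed character-frequency
-- dictionary aggregated over the distinct characters (objective: alternative).

-- ===== PORT A =====
-- A threads one pair (sum1, il_sam) through both strings: adding over s1, subtracting over s2.
def checkSamogloski : List Char := ['a','e','i','y','u','o']

def check (s1 : String) (s2 : String) : Bool :=
  let st1 := s1.toList.foldl
    (fun (st : Int × Int) letter =>
      (st.1 + (letter.toNat : Int),
       if letter ∈ checkSamogloski then st.2 + 1 else st.2))
    (0, 0)
  let st2 := s2.toList.foldl
    (fun (st : Int × Int) letter =>
      (st.1 - (letter.toNat : Int),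
       if letter ∈ checkSamogloski then st.2 - 1 else st.2))
    st1
  -- chained comparison: sum1 == il_sam == 0
  if st2.1 = st2.2 ∧ st2.2 = 0 then true else false

-- ===== PORT B =====
-- B: freq[c] = freq.get(c, 0) ± 1 over both strings, then two aggregations over freq.items().
def checkAltVowels : List Char := ['a','e','i','y','u','o']   -- 'c in "aeiyuo"' for a single char

def check_alt (s1 : String) (s2 : String) : Bool :=
  let freq1 : PySem.Dict Char Int :=
    s1.toList.foldl (fun d c => d.insert c (d.getD c 0 + 1)) PySem.Dict.empty
  let freq :=
    s2.toList.foldl (fun d c => d.insert c (d.getD c 0 - 1)) freq1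
  ((freq.items.map (fun p => (p.1.toNat : Int) * p.2)).sum == 0) &&
  (((freq.items.filter (fun p => checkAltVowels.contains p.1)).map (fun p => p.2)).sum == 0)

-- ===== PRECONDITION & SPEC =====
def Spec_check (s1 : String) (s2 : String) (out : Bool) : Prop := out = check_alt s1 s2
instance (s1 : String) (s2 : String) (out : Bool) : Decidable (Spec_check s1 s2 out) := by unfold Spec_check; infer_instance

-- ===== CLAIM (what is proved, stated in full; the proofs are below) =====
def Claim_equal_check : Prop := ∀ (s1 : String) (s2 : String), Dom_check s1 s2 → Spec_check s1 s2 (check s1 s2)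

-- ===== LEMMAS AND PROOFS =====

-- the two indicator/weight functions used throughout
def fOrd (c : Char) : Int := (c.toNat : Int)
def fVow (c : Char) : Int := if c ∈ checkSamogloski then 1 else 0

-- A's two folds compute the map-sum differences
theorem foldl_add_pair (l : List Char) (a b : Int) :
    l.foldl (fun (st : Int × Int) letter =>
      (st.1 + (letter.toNat : Int),
       if letter ∈ checkSamogloski then st.2 + 1 else st.2)) (a, b)
    = (a + (l.map fOrd).sum, b + (l.map fVow).sum) := by
  induction l generalizing a b with
  | nil => simp
  | cons x xs ih =>
    simp only [List.foldl_cons, List.map_cons, List.sum_cons, ih, fOrd, fVow, Prod.mk.injEq]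
    by_cases hx : x ∈ checkSamogloski <;> simp [hx] <;> (try constructor) <;> ring

theorem foldl_sub_pair (l : List Char) (a b : Int) :
    l.foldl (fun (st : Int × Int) letter =>
      (st.1 - (letter.toNat : Int),
       if letter ∈ checkSamogloski then st.2 - 1 else st.2)) (a, b)
    = (a - (l.map fOrd).sum, b - (l.map fVow).sum) := by
  induction l generalizing a b with
  | nil => simp
  | cons x xs ih =>
    simp only [List.foldl_cons, List.map_cons, List.sum_cons, ih, fOrd, fVow, Prod.mk.injEq]
    by_cases hx : x ∈ checkSamogloski <;> simp [hx] <;> (try constructor) <;> ring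

-- counting fold with -1 (the +1 version is PySem.Dict.getD_foldl_insert_add_one)
theorem getD_foldl_insert_sub_one (l : List Char) (d : PySem.Dict Char Int) (v : Char) :
    (l.foldl (fun d x => d.insert x (d.getD x 0 - 1)) d).getD v 0
      = d.getD v 0 - (l.count v : Int) := by
  induction l generalizing d with
  | nil => simp
  | cons x xs ih =>
    simp only [List.foldl_cons, ih, PySem.Dict.getD_insert, List.count_cons]
    by_cases h : v = x
    · subst h; simp; ring
    · have h' : ¬ x = v := fun e => h e.symm
      simp [h, h']

-- sum of an indicator over a Nodup list containing x
theorem sum_map_single (f : Char → Int) (K : List Char) (x : Char)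
    (hK : K.Nodup) (hx : x ∈ K) :
    (K.map (fun k => if k = x then f x else 0)).sum = f x := by
  induction K with
  | nil => cases hx
  | cons a K' ih =>
    have hnd := List.nodup_cons.mp hK
    rcases List.mem_cons.mp hx with h | h
    · have hz : (K'.map (fun k => if k = x then f x else 0)).sum = 0 := by
        apply List.sum_eq_zero
        intro y hy
        rcases List.mem_map.mp hy with ⟨k, hk, rfl⟩
        have hkx : k ≠ x := by rintro rfl; exact hnd.1 (h ▸ hk)
        simp [hkx]
      simp [← h, hz]
    · have ha : a ≠ x := by rintro rfl; exact hnd.1 h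
      simp [ha, ih hnd.2 h]

-- sum of negated terms
theorem sum_map_neg_int (K : List Char) (g : Char → Int) :
    (K.map (fun k => -(g k))).sum = -(K.map g).sum := by
  induction K with
  | nil => simp
  | cons a K' ih => simp [ih]; ring

-- weighted count sum over the distinct characters equals the plain map sum
theorem sum_mul_count (f : Char → Int) (K : List Char) (hK : K.Nodup) :
    ∀ l : List Char, (∀ c ∈ l, c ∈ K) →
      (K.map (fun k => f k * (l.count k : Int))).sum = (l.map f).sum := by
  intro l
  induction l with
  | nil => intro _; simp
  | cons x xs ih =>
    intro hmem
    have hx : x ∈ K := hmem x (List.mem_cons_self ..)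
    have hxs : ∀ c ∈ xs, c ∈ K := fun c hc => hmem c (List.mem_cons_of_mem _ hc)
    have hpt : ∀ k ∈ K, f k * (((x :: xs).count k : Nat) : Int)
        = f k * (xs.count k : Int) + (if k = x then f x else 0) := by
      intro k _
      by_cases h : k = x
      · subst h; simp; ring
      · have h' : ¬ x = k := fun e => h e.symm
        simp [h, h']
    rw [List.map_congr_left hpt, PySem.List.sum_map_add_int,
        ih hxs, sum_map_single f K x hK hx]
    simp; ring

-- difference form
theorem sum_mul_count_sub (f : Char → Int) (K l1 l2 : List Char) (hK : K.Nodup)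
    (h1 : ∀ c ∈ l1, c ∈ K) (h2 : ∀ c ∈ l2, c ∈ K) :
    (K.map (fun k => f k * ((l1.count k : Int) - (l2.count k : Int)))).sum
      = (l1.map f).sum - (l2.map f).sum := by
  have hpt : ∀ k ∈ K, f k * ((l1.count k : Int) - (l2.count k : Int))
      = f k * (l1.count k : Int) + -(f k * (l2.count k : Int)) := by
    intro k _; ring
  rw [List.map_congr_left hpt, PySem.List.sum_map_add_int,
      sum_map_neg_int K (fun k => f k * (l2.count k : Int)),
      sum_mul_count f K hK l1 h1, sum_mul_count f K hK l2 h2]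
  ring

-- filter-then-project sum is an indicator-weighted sum
theorem sum_filter_ite (K : List Char) (g : Char → Int) :
    (((K.map (fun k => (k, g k))).filter
        (fun p => checkSamogloski.contains p.1)).map (fun p => p.2)).sum
      = (K.map (fun k => fVow k * g k)).sum := by
  induction K with
  | nil => simp
  | cons a K' ih =>
    rw [List.map_cons, List.filter_cons]
    by_cases h : a ∈ checkSamogloski
    · rw [if_pos (by simpa using h), List.map_cons, List.sum_cons, ih,
          List.map_cons, List.sum_cons]
      simp [fVow, h]
    · rw [if_neg (by simpa using h), ih, List.map_cons, List.sum_cons]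
      simp [fVow, h]

theorem final_compare (X Y : Int) :
    (if X = Y ∧ Y = 0 then true else false) = ((X == 0) && (Y == 0)) := by
  split_ifs with h
  · simp [h.1.trans h.2, h.2]
  · rcases Decidable.em (X = 0) with hx | hx
    · rcases Decidable.em (Y = 0) with hy | hy
      · exact absurd ⟨hx.trans hy.symm, hy⟩ h
      · simp [hy]
    · simp [hx]

-- ===== VERDICT (by name: the statement is the Claim_ definition above) =====
theorem check_spec : Claim_equal_check := by
  intro s1 s2 _
  unfold Spec_check check check_alt
  dsimp only
  rw [show checkAltVowels = checkSamogloski from rfl]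
  rw [foldl_add_pair, foldl_sub_pair]
  -- the signed frequency dictionary
  have hnd1 : (s1.toList.foldl (fun d c => d.insert c (d.getD c 0 + 1))
      (PySem.Dict.empty : PySem.Dict Char Int)).keys.Nodup :=
    PySem.Dict.nodup_keys_foldl_insert _ _ _ (by simp)
  have hnd : (s2.toList.foldl (fun d c => d.insert c (d.getD c 0 - 1))
      (s1.toList.foldl (fun d c => d.insert c (d.getD c 0 + 1))
        (PySem.Dict.empty : PySem.Dict Char Int))).keys.Nodup :=
    PySem.Dict.nodup_keys_foldl_insert _ _ _ hnd1
  have hk : (s2.toList.foldl (fun d c => d.insert c (d.getD c 0 - 1))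
      (s1.toList.foldl (fun d c => d.insert c (d.getD c 0 + 1))
        (PySem.Dict.empty : PySem.Dict Char Int))).keys
      = PySem.Set.ofList (s1.toList ++ s2.toList) := by
    rw [PySem.Dict.keys_foldl_insert, PySem.Dict.keys_foldl_insert]
    rw [PySem.Set.ofList_append]
    simp [PySem.Set.update_nil_left]
  have hg : ∀ c, (s2.toList.foldl (fun d c => d.insert c (d.getD c 0 - 1))
      (s1.toList.foldl (fun d c => d.insert c (d.getD c 0 + 1))
        (PySem.Dict.empty : PySem.Dict Char Int))).getD c 0
      = (s1.toList.count c : Int) - (s2.toList.count c : Int) := by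
    intro c
    rw [getD_foldl_insert_sub_one, PySem.Dict.getD_foldl_insert_add_one]
    simp
  have hi : (s2.toList.foldl (fun d c => d.insert c (d.getD c 0 - 1))
      (s1.toList.foldl (fun d c => d.insert c (d.getD c 0 + 1))
        (PySem.Dict.empty : PySem.Dict Char Int))).items
      = (PySem.Set.ofList (s1.toList ++ s2.toList)).map
          (fun k => (k, (s1.toList.count k : Int) - (s2.toList.count k : Int))) := by
    rw [PySem.Dict.items_eq_map_keys _ hnd 0, hk]
    exact List.map_congr_left (fun k _ => by rw [hg k])
  rw [hi]
  have hKnd : (PySem.Set.ofList (s1.toList ++ s2.toList) : List Char).Nodup :=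
    PySem.Set.nodup_ofList _
  have hm1 : ∀ c ∈ s1.toList, c ∈ (PySem.Set.ofList (s1.toList ++ s2.toList) : List Char) := by
    intro c hc; rw [PySem.Set.mem_ofList]; exact List.mem_append_left _ hc
  have hm2 : ∀ c ∈ s2.toList, c ∈ (PySem.Set.ofList (s1.toList ++ s2.toList) : List Char) := by
    intro c hc; rw [PySem.Set.mem_ofList]; exact List.mem_append_right _ hc
  -- ord-weighted sum
  have hsum1 : (((PySem.Set.ofList (s1.toList ++ s2.toList) : List Char).map
        (fun k => (k, (s1.toList.count k : Int) - (s2.toList.count k : Int)))).map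
          (fun p => (p.1.toNat : Int) * p.2)).sum
      = (s1.toList.map fOrd).sum - (s2.toList.map fOrd).sum := by
    rw [List.map_map]
    have : ((fun p : Char × Int => (p.1.toNat : Int) * p.2) ∘
        (fun k => (k, (s1.toList.count k : Int) - (s2.toList.count k : Int))))
        = fun k => fOrd k * ((s1.toList.count k : Int) - (s2.toList.count k : Int)) := rfl
    rw [this, sum_mul_count_sub fOrd _ _ _ hKnd hm1 hm2]
  -- vowel-count sum
  have hsum2 : ((((PySem.Set.ofList (s1.toList ++ s2.toList) : List Char).map
        (fun k => (k, (s1.toList.count k : Int) - (s2.toList.count k : Int)))).filter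
          (fun p => checkSamogloski.contains p.1)).map (fun p => p.2)).sum
      = (s1.toList.map fVow).sum - (s2.toList.map fVow).sum := by
    rw [sum_filter_ite, sum_mul_count_sub fVow _ _ _ hKnd hm1 hm2]
  rw [hsum1, hsum2]
  simp only [zero_add]
  exact final_compare _ _
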